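-- pv_equiv track=rewrite | github.com/abhilashpuli99/Leetcode | 3894-MaximizeYsumByPickingATripletOfDistinctXvalues/3894-MaximizeYsumByPickingATripletOfDistinctXvalues.py | maxSumDistinctTriplet
-- ===== SOURCE A (Python) =====
-- from typing import List
--
-- def maxSumDistinctTriplet(x: List[int], y: List[int]) -> int:
--     from collections import defaultdict
--     best_y=dict()
--     for xi,yi in zip(x,y):
--         if xi not in best_y or yi>best_y[xi]:
--             best_y[xi]=yi
--     if len(best_y)<3:
--         return -1
--     return sum(sorted(best_y.values(),reverse=True)[:3])
-- ===== SOURCE B (Python) =====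
-- def maxSumDistinctTriplet(x, y):
--     pairs = list(zip(x, y))
--     keys = list(dict.fromkeys(xi for xi, _ in pairs))
--     if len(keys) < 3:
--         return -1
--     maxima = [max([yj for xj, yj in pairs if xj == k]) for k in keys]
--     top = sorted(maxima, reverse=True)
--     return top[0] + top[1] + top[2]
-- ===== Notes on version B (the rewrite author's own statement) =====
-- stated objective: alternative
-- what changed: replaces the running-max dict with an ordered dedup of the x values followed by a per-key full scan for each key's maximum y, then sums the three largest maxima by direct indexing
import Mathlib
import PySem

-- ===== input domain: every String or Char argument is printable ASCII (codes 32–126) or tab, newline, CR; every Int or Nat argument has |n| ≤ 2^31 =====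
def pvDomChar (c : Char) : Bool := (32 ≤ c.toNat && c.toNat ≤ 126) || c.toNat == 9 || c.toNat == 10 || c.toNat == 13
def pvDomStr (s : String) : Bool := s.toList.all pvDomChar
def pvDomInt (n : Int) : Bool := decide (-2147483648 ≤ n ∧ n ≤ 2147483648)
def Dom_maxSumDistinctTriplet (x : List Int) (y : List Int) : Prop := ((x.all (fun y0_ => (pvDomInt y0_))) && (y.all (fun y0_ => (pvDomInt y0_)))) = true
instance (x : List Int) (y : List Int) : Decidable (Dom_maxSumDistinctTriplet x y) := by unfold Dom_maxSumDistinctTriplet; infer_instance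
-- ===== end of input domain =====

-- B replaces A's running-max dict with an ordered dedup of the x values plus a per-key scan for each maximum y (alternative decomposition, not faster).


-- ===== PORT A =====
-- the dict-update step: `if xi not in best_y or yi > best_y[xi]: best_y[xi] = yi`
def pvStepA (d : PySem.Dict Int Int) (p : Int × Int) : PySem.Dict Int Int :=
  match d.get? p.1 with
  | none => d.insert p.1 p.2
  | some v => if p.2 > v then d.insert p.1 p.2 else d

def maxSumDistinctTriplet (x : List Int) (y : List Int) : Int :=
  let best := (x.zip y).foldl pvStepA PySem.Dict.empty
  if best.size < 3 then -1
  else ((PySem.List.sorted best.values (fun v => v) true).take 3).sum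

-- ===== PORT B =====
-- max([yj for xj,yj in pairs if xj == k]); the 0 default is never reached (k always occurs in pairs)
def pvMaxK (pairs : List (Int × Int)) (k : Int) : Int :=
  match PySem.List.max? ((pairs.filter (fun p => p.1 == k)).map (·.2)) (fun v => v) with
  | some m => m
  | none => 0

def maxSumDistinctTriplet_alt (x : List Int) (y : List Int) : Int :=
  let pairs := x.zip y
  let keys := PySem.List.dedup (pairs.map (·.1))
  if keys.length < 3 then -1
  else
    let top := PySem.List.sorted (keys.map (pvMaxK pairs)) (fun v => v) true
    PySem.List.pyGetD top 0 0 + PySem.List.pyGetD top 1 0 + PySem.List.pyGetD top 2 0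

-- ===== PRECONDITION & SPEC =====
def Spec_maxSumDistinctTriplet (x : List Int) (y : List Int) (out : Int) : Prop := out = maxSumDistinctTriplet_alt x y
instance (x : List Int) (y : List Int) (out : Int) : Decidable (Spec_maxSumDistinctTriplet x y out) := by unfold Spec_maxSumDistinctTriplet; infer_instance

-- ===== CLAIM (what is proved, stated in full; the proofs are below) =====
def Claim_equal_maxSumDistinctTriplet : Prop := ∀ (x : List Int) (y : List Int), Dom_maxSumDistinctTriplet x y → Spec_maxSumDistinctTriplet x y (maxSumDistinctTriplet x y)

-- ===== LEMMAS AND PROOFS =====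

-- ordered dedup distributes over a final append
lemma dedup_append_singleton (l : List Int) (a : Int) :
    PySem.List.dedup (l ++ [a]) = if a ∈ l then PySem.List.dedup l else PySem.List.dedup l ++ [a] := by
  simp only [PySem.List.dedup_eq_ofList, PySem.Set.ofList_eq_foldl, List.foldl_append, List.foldl_cons, List.foldl_nil]
  rw [PySem.Set.add]
  simp [PySem.Set.contains, ← PySem.Set.ofList_eq_foldl, PySem.Set.mem_ofList]

lemma max?_id_append (l : List Int) (b : Int) :
    PySem.List.max? (l ++ [b]) (fun v => v)
      = some ((PySem.List.max? l (fun v => v)).elim b (fun m => max m b)) := by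
  cases l with
  | nil => simp [PySem.List.max?]
  | cons x t => simp [PySem.List.max?_id_cons, List.foldl_append]

lemma pvMaxK_append_ne (ps : List (Int × Int)) (q : Int × Int) (k : Int) (h : ¬ q.1 = k) :
    pvMaxK (ps ++ [q]) k = pvMaxK ps k := by
  simp [pvMaxK, List.filter_append, h]

lemma pvMaxK_append_fresh (ps : List (Int × Int)) (a b : Int) (h : a ∉ ps.map (·.1)) :
    pvMaxK (ps ++ [(a, b)]) a = b := by
  have hf : ps.filter (fun p => p.1 == a) = [] := by
    rw [List.filter_eq_nil_iff]; intro p hp hpa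
    exact h (List.mem_map.mpr ⟨p, hp, by simpa using hpa⟩)
  simp [pvMaxK, List.filter_append, hf, PySem.List.max?]

lemma pvMaxK_append_mem (ps : List (Int × Int)) (a b : Int) (h : a ∈ ps.map (·.1)) :
    pvMaxK (ps ++ [(a, b)]) a = max (pvMaxK ps a) b := by
  obtain ⟨p, hp, hpa⟩ := List.mem_map.mp h
  have hne : (ps.filter (fun p => p.1 == a)).map (·.2) ≠ [] := by
    simp only [ne_eq, List.map_eq_nil_iff, List.filter_eq_nil_iff]
    intro hf; exact hf p hp (by simp [hpa])
  obtain ⟨v, hv⟩ : ∃ v, PySem.List.max? ((ps.filter (fun p => p.1 == a)).map (·.2)) (fun v => v) = some v := by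
    cases hm : PySem.List.max? ((ps.filter (fun p => p.1 == a)).map (·.2)) (fun v => v) with
    | none => exact absurd ((PySem.List.max?_eq_none_iff _ _).mp hm) hne
    | some v => exact ⟨v, rfl⟩
  simp [pvMaxK, List.filter_append, max?_id_append, hv]

-- the dict built by A's loop is exactly B's key list paired with B's per-key maxima
lemma items_build (ps : List (Int × Int)) :
    (ps.foldl pvStepA PySem.Dict.empty).items
      = (PySem.List.dedup (ps.map (·.1))).map (fun k => (k, pvMaxK ps k)) := by
  induction ps using List.reverseRecOn with
  | nil => simp [pvMaxK, PySem.Dict.empty]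
  | append_singleton ps q ih =>
    obtain ⟨a, b⟩ := q
    rw [List.foldl_append, List.foldl_cons, List.foldl_nil]
    set d := ps.foldl pvStepA PySem.Dict.empty with hd
    have hkeys : d.keys = PySem.List.dedup (ps.map (·.1)) := by
      simp only [PySem.Dict.keys, ih, List.map_map]
      exact List.map_id' _
    have hnd : d.keys.Nodup := by rw [hkeys]; exact PySem.List.nodup_dedup _
    by_cases ha : a ∈ ps.map (·.1)
    · have hmemk : a ∈ d.keys := by rw [hkeys]; exact (PySem.List.mem_dedup _ _).mpr ha
      have hitem : (a, pvMaxK ps a) ∈ d.items := by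
        rw [ih]; exact List.mem_map.mpr ⟨a, (PySem.List.mem_dedup _ _).mpr ha, rfl⟩
      have hget : d.get? a = some (pvMaxK ps a) := PySem.Dict.get?_of_mem_items d hitem hnd
      have hcont : d.contains a = true := (PySem.Dict.contains_iff_mem_keys _ _).mpr hmemk
      have hded : PySem.List.dedup ((ps ++ [(a, b)]).map (·.1)) = PySem.List.dedup (ps.map (·.1)) := by
        simp only [List.map_append, List.map_cons, List.map_nil]
        rw [dedup_append_singleton, if_pos ha]
      rw [pvStepA, hget]
      by_cases hgt : b > pvMaxK ps a
      · simp only [hgt, if_true]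
        rw [PySem.Dict.items_insert_of_contains d b hcont, ih, List.map_map, hded]
        apply List.map_congr_left
        intro k hk
        by_cases hka : k = a
        · subst hka
          simp [pvMaxK_append_mem ps k b ha, max_eq_right (le_of_lt hgt)]
        · simp [Function.comp, hka, pvMaxK_append_ne ps (a, b) k (by simpa using (Ne.symm hka))]
      · simp only [hgt, if_false]
        rw [ih, hded]
        apply List.map_congr_left
        intro k hk
        by_cases hka : k = a
        · subst hka
          rw [pvMaxK_append_mem ps k b ha, max_eq_left (by omega)]
        · rw [pvMaxK_append_ne ps (a, b) k (by simpa using (Ne.symm hka))]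
    · have hget : d.get? a = none := by
        rw [PySem.Dict.get?_eq_none_iff_not_mem_keys, hkeys]
        exact fun h => ha ((PySem.List.mem_dedup _ _).mp h)
      have hcont : d.contains a = false := by
        rw [PySem.Dict.contains_eq_isSome_get?, hget]; rfl
      have hded : PySem.List.dedup ((ps ++ [(a, b)]).map (·.1))
          = PySem.List.dedup (ps.map (·.1)) ++ [a] := by
        simp only [List.map_append, List.map_cons, List.map_nil]
        rw [dedup_append_singleton, if_neg ha]
      rw [pvStepA, hget, PySem.Dict.items_insert_of_not_contains d b hcont, ih, hded,
        List.map_append]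
      congr 1
      · apply List.map_congr_left
        intro k hk
        have hka : ¬ (a = k) := fun h => ha (h ▸ (PySem.List.mem_dedup _ _).mp hk)
        rw [pvMaxK_append_ne ps (a, b) k hka]
      · simp [pvMaxK_append_fresh ps a b ha]

lemma ports_eq (x y : List Int) : maxSumDistinctTriplet x y = maxSumDistinctTriplet_alt x y := by
  unfold maxSumDistinctTriplet maxSumDistinctTriplet_alt
  simp only []
  show (if (List.foldl pvStepA PySem.Dict.empty (x.zip y)).size < 3 then (-1 : Int) else _) = _
  have hitems := items_build (x.zip y)
  have hsize : ((x.zip y).foldl pvStepA PySem.Dict.empty).size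
      = (PySem.List.dedup ((x.zip y).map (·.1))).length := by
    simp [PySem.Dict.size, hitems]
  have hvals : ((x.zip y).foldl pvStepA PySem.Dict.empty).values
      = (PySem.List.dedup ((x.zip y).map (·.1))).map (pvMaxK (x.zip y)) := by
    simp [PySem.Dict.values, hitems, List.map_map]
  rw [hsize, hvals]
  by_cases h : (PySem.List.dedup ((x.zip y).map (·.1))).length < 3
  · rw [if_pos h, if_pos h]
  · rw [if_neg h, if_neg h]
    have hlen : (PySem.List.sorted ((PySem.List.dedup ((x.zip y).map (·.1))).map (pvMaxK (x.zip y))) (fun v => v) true).length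
        = (PySem.List.dedup ((x.zip y).map (·.1))).length := by
      rw [PySem.List.length_sorted, List.length_map]
    set top := PySem.List.sorted ((PySem.List.dedup ((x.zip y).map (·.1))).map (pvMaxK (x.zip y))) (fun v => v) true with htop
    match top, hlen with
    | a :: b :: c :: rest, _ =>
      simp [PySem.List.pyGetD_ofNat']
      ring
    | [], hl => rw [← hl] at h; simp at h
    | [a], hl => rw [← hl] at h; simp at h
    | [a, b], hl => rw [← hl] at h; simp at h

-- ===== VERDICT (by name: the statement is the Claim_ definition above) =====
theorem maxSumDistinctTriplet_spec : Claim_equal_maxSumDistinctTriplet := by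
  intro x y _
  unfold Spec_maxSumDistinctTriplet
  exact ports_eq x y
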